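-- pv_equiv track=rewrite | github.com/Kazun1998/library_for_python | Integer/Equation.py | Integer_Inequality
-- ===== SOURCE A (Python) =====
-- def Integer_Inequality(P, Y, L=0, mode=True, default=None):
--     """ P[0]+P[1]x+...+P[n-1]x^(n-1) <= Y を満たす最大の整数 x を求める.
--
--     P: 多項式 (1次以上, 非零であり, L<=x の範囲で P は単調増加でなくてはならない).
--     Y: int
--     L: int (x としてありうる下界を求める).
--     mode: True の場合は <=, False の場合は < になる.
--     default: 存在しない場合の返り値
--     """
--
--     P=list(P)
--     while P and P[-1]==0:
--         P.pop()
--     assert len(P)>=2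
--
--     def calc(x):
--         y=0
--         for p in reversed(P):
--             y=(y*x+p)
--         return y
--
--     if calc(L)>Y or (not mode and calc(L)==Y):
--         return default
--
--     # 上界を求める
--     d=1
--     if mode:
--         while calc(L+d)<=Y:
--             d*=2
--     else:
--         while calc(L+d)<Y:
--             d*=2
--     R=L+d
--
--     # 解を求める
--     while R-L>1:
--         C=L+(R-L)//2
--         y0=calc(C)
--         if y0<Y or (mode and y0==Y):
--             L=C
--         else:
--             R=C
--     return L
-- ===== SOURCE B (Python) =====
-- def Integer_Inequality(P, Y, L=0, mode=True, default=None):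
--     """Largest integer x >= L with P(x) <= Y (mode=True) / P(x) < Y (mode=False).
--
--     Different decomposition: trim by one forward scan for the last nonzero
--     coefficient, evaluate by an ascending-power accumulator, use the complementary
--     predicate `fail`, find the first failing power-of-two offset recursively,
--     then descend from that failing point, halving the gap, and return
--     (least failing probe found) - 1.
--     """
--     last = -1
--     for i, p in enumerate(P):
--         if p != 0:
--             last = i
--     Q = list(P[:last + 1])
--     assert len(Q) >= 2
--
--     def fail(x):
--         v, t = 0, 1
--         for p in Q:
--             v += p * t
--             t *= x
--         return v > Y if mode else v >= Y
--
--     if fail(L):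
--         return default
--
--     def first_fail(d):
--         return d if fail(L + d) else first_fail(2 * d)
--
--     def descend(bad, gap):
--         if gap == 1:
--             return bad - 1
--         half = gap // 2
--         return descend(bad - half, half) if fail(bad - half) else descend(bad, half)
--
--     g = first_fail(1)
--     return descend(L + g, g)
-- ===== Notes on version B (the rewrite author's own statement) =====
-- stated objective: alternative
-- what changed: Since A's exact result on non-monotone inputs is determined by its probe sequence, B keeps the probe points but inverts the whole decomposition: a single forward enumerate scan for the last nonzero coefficient replaces A's pop-loop trim, an ascending-power accumulator replaces reversed-list Horner, the complementary predicate `fail` replaces A's two mode-split inequality forms, a recursive `first_fail` replaces the doubling while-loops, and a recursive top-down `descend` that walks DOWN from the first failing point by halving gaps and returns (least failing probe)-1 replaces A's upward [L,R] …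
-- outside the precondition, e.g. on Integer_Inequality([0, 5, -1], 3, 0, True, None): A returns 0, B returns 0; on Integer_Inequality([5, 1, -1], 3, 0, True, None): A returns None, B returns None
import Mathlib
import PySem

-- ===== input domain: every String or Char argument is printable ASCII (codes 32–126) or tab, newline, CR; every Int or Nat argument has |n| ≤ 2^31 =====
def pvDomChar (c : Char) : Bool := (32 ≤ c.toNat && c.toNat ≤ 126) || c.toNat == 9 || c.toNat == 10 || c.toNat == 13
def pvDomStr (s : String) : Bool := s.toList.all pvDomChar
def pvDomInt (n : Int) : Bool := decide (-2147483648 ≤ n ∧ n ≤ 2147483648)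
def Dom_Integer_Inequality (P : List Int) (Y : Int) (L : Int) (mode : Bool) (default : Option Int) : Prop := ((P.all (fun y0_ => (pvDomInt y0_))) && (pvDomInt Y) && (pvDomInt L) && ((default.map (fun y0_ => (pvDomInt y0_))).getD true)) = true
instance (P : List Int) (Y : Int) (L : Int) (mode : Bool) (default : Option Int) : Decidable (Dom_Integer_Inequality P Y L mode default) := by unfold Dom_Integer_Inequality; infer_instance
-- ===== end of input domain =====

-- B keeps A's probe points (the exact result depends on them) but inverts the decomposition:
-- forward-scan trim, power-sum evaluation, complementary predicate, and a recursive top-down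
-- descent from the first failing point instead of A's upward [L,R] bisection (objective: alternative).

-- ===== PORT A =====
-- while P and P[-1]==0: P.pop()
def pvTrimAGo : Nat → List Int → List Int
  | 0, P => P
  | n + 1, P => if P.getLast? = some 0 then pvTrimAGo n P.dropLast else P

def pvTrimA (P : List Int) : List Int := pvTrimAGo P.length P  -- fuel = len P: each pop removes one element

-- def calc(x): y=0; for p in reversed(P): y = y*x+p
def pvCalcA (Q : List Int) (x : Int) : Int :=
  Q.reverse.foldl (fun y p => y * x + p) 0

-- d=1; while calc(L+d)<=Y: d*=2   (fueled: the Python loop diverges where no bound exists, outside Pre_)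
def pvGrowLe (Q : List Int) (Y L : Int) : Nat → Int → Int
  | 0, d => d
  | n + 1, d => if pvCalcA Q (L + d) ≤ Y then pvGrowLe Q Y L n (d * 2) else d

-- d=1; while calc(L+d)<Y: d*=2
def pvGrowLt (Q : List Int) (Y L : Int) : Nat → Int → Int
  | 0, d => d
  | n + 1, d => if pvCalcA Q (L + d) < Y then pvGrowLt Q Y L n (d * 2) else d

-- while R-L>1: C=L+(R-L)//2; y0=calc(C); if y0<Y or (mode and y0==Y): L=C else: R=C
def pvBisectGo (Q : List Int) (Y : Int) (mode : Bool) : Nat → Int → Int → Int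
  | 0, L, _ => L
  | n + 1, L, R =>
    if 1 < R - L then
      let C := L + PySem.Int.floordiv (R - L) 2
      let y0 := pvCalcA Q C
      if y0 < Y ∨ (mode = true ∧ y0 = Y) then pvBisectGo Q Y mode n C R
      else pvBisectGo Q Y mode n L C
    else L

def pvBisect (Q : List Int) (Y : Int) (mode : Bool) (L R : Int) : Int :=
  pvBisectGo Q Y mode (R - L).toNat L R  -- fuel = R-L: the interval shrinks every iteration

def Integer_Inequality (P : List Int) (Y : Int) (L : Int) (mode : Bool) (default : Option Int) : Option Int :=
  let Q := pvTrimA P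
  if 2 ≤ Q.length then
    if pvCalcA Q L > Y ∨ (mode = false ∧ pvCalcA Q L = Y) then default
    else
      let d := if mode then pvGrowLe Q Y L 100 1 else pvGrowLt Q Y L 100 1
      some (pvBisect Q Y mode L (L + d))
  else none  -- assert len(P)>=2 fails: AssertionError (outside Pre_)

-- ===== PORT B =====
-- last = -1; for i, p in enumerate(P): if p != 0: last = i
def pvLastNZ (P : List Int) : Int :=
  (PySem.List.enumerate P 0).foldl (fun last kp => if kp.2 ≠ 0 then kp.1 else last) (-1)

-- v, t = 0, 1; for p in Q: v += p * t; t *= x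
def pvValB (Q : List Int) (x : Int) : Int :=
  (Q.foldl (fun (st : Int × Int) p => (st.1 + p * st.2, st.2 * x)) (0, 1)).1

-- return v > Y if mode else v >= Y
def pvFail (Q : List Int) (Y : Int) (mode : Bool) (x : Int) : Bool :=
  if mode then decide (pvValB Q x > Y) else decide (pvValB Q x ≥ Y)

-- def first_fail(d): return d if fail(L+d) else first_fail(2*d)   (fueled: diverges outside Pre_)
def pvFirstFail (Q : List Int) (Y : Int) (mode : Bool) (L : Int) : Nat → Int → Int
  | 0, d => d
  | n + 1, d => if pvFail Q Y mode (L + d) then d else pvFirstFail Q Y mode L n (2 * d)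

-- def descend(bad, gap): if gap == 1: return bad - 1; half = gap // 2;
--   return descend(bad - half, half) if fail(bad - half) else descend(bad, half)
def pvDescendGo (Q : List Int) (Y : Int) (mode : Bool) : Nat → Int → Int → Int
  | 0, bad, _ => bad - 1
  | n + 1, bad, gap =>
    if gap = 1 then bad - 1
    else
      let half := PySem.Int.floordiv gap 2
      if pvFail Q Y mode (bad - half) then pvDescendGo Q Y mode n (bad - half) half
      else pvDescendGo Q Y mode n bad half

def pvDescend (Q : List Int) (Y : Int) (mode : Bool) (bad gap : Int) : Int :=
  pvDescendGo Q Y mode gap.toNat bad gap  -- fuel = gap: the gap halves every call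

def Integer_Inequality_alt (P : List Int) (Y : Int) (L : Int) (mode : Bool) (default : Option Int) : Option Int :=
  let Q := P.take (pvLastNZ P + 1).toNat  -- Q = P[:last+1]; last+1 >= 0, so the slice is a take
  if 2 ≤ Q.length then
    if pvFail Q Y mode L then default
    else
      let g := pvFirstFail Q Y mode L 100 1
      some (pvDescend Q Y mode (L + g) g)
  else none  -- assert fails (outside Pre_)

-- ===== PRECONDITION & SPEC =====
-- Helper for Pre_ only (independent of both ports): strip trailing zero coefficients.
def pvStrip (P : List Int) : List Int := (P.reverse.dropWhile (· == 0)).reverse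

-- Pre_ excludes inputs whose trimmed coefficient list has fewer than two entries (A's assert
-- raises AssertionError) and inputs whose leading coefficient is negative: there the polynomial
-- eventually decreases, A's doubling loop diverges on typical inputs (A never returns), and on
-- the exceptional such inputs where A does return early, B returns the same value (see cites).
def Pre_Integer_Inequality (P : List Int) (Y : Int) (L : Int) (mode : Bool) (default : Option Int) : Prop :=
  2 ≤ (pvStrip P).length ∧ 0 < (pvStrip P).getLast?.getD 0
instance (P : List Int) (Y : Int) (L : Int) (mode : Bool) (default : Option Int) : Decidable (Pre_Integer_Inequality P Y L mode default) := by unfold Pre_Integer_Inequality; infer_instance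

def pvWitness_Integer_Inequality : List Int × Int × Int × Bool × Option Int := ([0, 1], 5, 0, true, none)

def Spec_Integer_Inequality (P : List Int) (Y : Int) (L : Int) (mode : Bool) (default : Option Int) (out : Option Int) : Prop := out = Integer_Inequality_alt P Y L mode default
instance (P : List Int) (Y : Int) (L : Int) (mode : Bool) (default : Option Int) (out : Option Int) : Decidable (Spec_Integer_Inequality P Y L mode default out) := by unfold Spec_Integer_Inequality; infer_instance

-- ===== CLAIM (what is proved, stated in full; the proofs are below) =====
def Claim_equal_Integer_Inequality : Prop := ∀ (P : List Int) (Y : Int) (L : Int) (mode : Bool) (default : Option Int), Dom_Integer_Inequality P Y L mode default → Pre_Integer_Inequality P Y L mode default → Spec_Integer_Inequality P Y L mode default (Integer_Inequality P Y L mode default)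

-- ===== LEMMAS AND PROOFS =====

-- 0. reference polynomial evaluation
def pvPoly (Q : List Int) (x : Int) : Int := Q.foldr (fun p acc => p + x * acc) 0

theorem calcA_eq_poly (Q : List Int) (x : Int) : pvCalcA Q x = pvPoly Q x := by
  unfold pvCalcA pvPoly
  rw [List.foldl_reverse]
  congr 1
  funext p acc
  ring

theorem valB_aux (x : Int) :
    ∀ (Q : List Int) (a t : Int),
      (Q.foldl (fun (st : Int × Int) p => (st.1 + p * st.2, st.2 * x)) (a, t)).1
        = a + t * pvPoly Q x := by
  intro Q
  induction Q with
  | nil => intro a t; simp [pvPoly]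
  | cons p Q ih =>
    intro a t
    rw [List.foldl_cons, ih]
    have hp : pvPoly (p :: Q) x = p + x * pvPoly Q x := rfl
    rw [hp]
    ring

theorem valB_eq_poly (Q : List Int) (x : Int) : pvValB Q x = pvPoly Q x := by
  unfold pvValB
  rw [valB_aux]
  ring

theorem calcA_eq_valB (Q : List Int) (x : Int) : pvCalcA Q x = pvValB Q x := by
  rw [calcA_eq_poly, valB_eq_poly]

-- 1. the two trims agree
theorem pvTrimA_eq (P : List Int) :
    pvTrimA P = if P.getLast? = some 0 then pvTrimA P.dropLast else P := by
  rcases P.eq_nil_or_concat' with rfl | ⟨l, a, rfl⟩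
  · simp [pvTrimA, pvTrimAGo]
  · have h : (l ++ [a]).length = l.length + 1 := by simp
    have hdl : (l ++ [a]).dropLast = l := by simp
    simp only [pvTrimA, h, pvTrimAGo, hdl]

theorem lastNZ_concat (l : List Int) (a : Int) :
    pvLastNZ (l ++ [a]) = if a ≠ 0 then (l.length : Int) else pvLastNZ l := by
  unfold pvLastNZ
  rw [PySem.List.enumerate_append, List.foldl_append,
    PySem.List.enumerate_cons, PySem.List.enumerate_nil]
  simp

theorem lastNZ_lt (P : List Int) : pvLastNZ P < (P.length : Int) := by
  induction P using List.reverseRecOn with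
  | nil => simp [pvLastNZ, PySem.List.enumerate_nil]
  | append_singleton l a ih =>
    rw [lastNZ_concat]
    have : ((l ++ [a]).length : Int) = (l.length : Int) + 1 := by simp
    rw [this]
    split <;> omega

theorem lastNZ_ge (P : List Int) : -1 ≤ pvLastNZ P := by
  induction P using List.reverseRecOn with
  | nil => simp [pvLastNZ, PySem.List.enumerate_nil]
  | append_singleton l a ih =>
    rw [lastNZ_concat]
    split <;> omega

theorem take_lastNZ_eq_trimA (P : List Int) : P.take (pvLastNZ P + 1).toNat = pvTrimA P := by
  induction P using List.reverseRecOn with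
  | nil => simp [pvTrimA, pvTrimAGo]
  | append_singleton l a ih =>
    rw [pvTrimA_eq]
    have hlast : (l ++ [a]).getLast? = some a := by simp
    have hdl : (l ++ [a]).dropLast = l := by simp
    by_cases ha : a = 0
    · subst ha
      rw [if_pos (by rw [hlast]), hdl, lastNZ_concat]
      rw [if_neg (by simp)]
      have hlt := lastNZ_lt l
      have hge := lastNZ_ge l
      have hle : (pvLastNZ l + 1).toNat ≤ l.length := by omega
      rw [List.take_append_of_le_length hle, ih]
    · rw [if_neg (by rw [hlast]; simp [ha]), lastNZ_concat, if_pos ha]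
      have : ((l.length : Int) + 1).toNat = l.length + 1 := by omega
      rw [this]
      have hlen : (l ++ [a]).length = l.length + 1 := by simp
      rw [← hlen, List.take_length]

-- 2. fail is the complement of A's branch conditions
theorem fail_iff_not_ok (Q : List Int) (Y : Int) (mode : Bool) (x : Int) :
    (pvCalcA Q x < Y ∨ (mode = true ∧ pvCalcA Q x = Y)) ↔ pvFail Q Y mode x = false := by
  rw [calcA_eq_valB]
  cases mode <;> simp [pvFail] <;> omega

theorem fail_iff_guard (Q : List Int) (Y : Int) (mode : Bool) (x : Int) :
    (pvCalcA Q x > Y ∨ (mode = false ∧ pvCalcA Q x = Y)) ↔ pvFail Q Y mode x = true := by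
  rw [calcA_eq_valB]
  cases mode <;> simp [pvFail] <;> omega

-- 3. A's mode-split doubling loops equal B's recursive first_fail
theorem growLe_eq (Q : List Int) (Y L : Int) :
    ∀ (n : Nat) (d : Int), pvGrowLe Q Y L n d = pvFirstFail Q Y true L n d := by
  intro n
  induction n with
  | zero => intro d; rfl
  | succ n ih =>
    intro d
    simp only [pvGrowLe, pvFirstFail, pvFail, if_true, calcA_eq_valB]
    by_cases h : pvValB Q (L + d) ≤ Y
    · rw [if_pos h, if_neg (by simp; omega), mul_comm d 2, ih]
    · rw [if_neg h, if_pos (by simp; omega)]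

theorem growLt_eq (Q : List Int) (Y L : Int) :
    ∀ (n : Nat) (d : Int), pvGrowLt Q Y L n d = pvFirstFail Q Y false L n d := by
  intro n
  induction n with
  | zero => intro d; rfl
  | succ n ih =>
    intro d
    simp only [pvGrowLt, pvFirstFail, pvFail, if_false, calcA_eq_valB]
    by_cases h : pvValB Q (L + d) < Y
    · rw [if_pos h, if_neg (by simp; omega), mul_comm d 2, ih]
    · rw [if_neg h, if_pos (by simp; omega)]

-- 4. first_fail returns a power of two
theorem firstFail_pow (Q : List Int) (Y : Int) (mode : Bool) (L : Int) :
    ∀ (n j : Nat), ∃ j' : Nat, pvFirstFail Q Y mode L n ((2 : Int) ^ j) = 2 ^ j' := by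
  intro n
  induction n with
  | zero => intro j; exact ⟨j, rfl⟩
  | succ n ih =>
    intro j
    simp only [pvFirstFail]
    split
    · exact ⟨j, rfl⟩
    · obtain ⟨j', hj'⟩ := ih (j + 1)
      refine ⟨j', ?_⟩
      rw [← hj', pow_succ]
      ring_nf

-- 5. floordiv on powers of two
theorem fd_pow (j : Nat) : PySem.Int.floordiv ((2 : Int) ^ (j + 1)) 2 = 2 ^ j := by
  rw [PySem.Int.floordiv_eq_ediv_of_pos (by omega), pow_succ]
  exact Int.mul_ediv_cancel _ (by omega)

-- 6. MAIN LEMMA: on an interval of power-of-two length, A's upward bisection and B's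
-- top-down descent walk exactly the same probes (for an ARBITRARY predicate outcome sequence).
theorem bisectGo_eq_descendGo (Q : List Int) (Y : Int) (mode : Bool) :
    ∀ (j n m : Nat) (cur : Int), j ≤ n → j < m →
      pvBisectGo Q Y mode n cur (cur + 2 ^ j)
        = pvDescendGo Q Y mode m (cur + 2 ^ j) (2 ^ j) := by
  intro j
  induction j with
  | zero =>
    intro n m cur _ hm
    obtain ⟨m', rfl⟩ : ∃ m', m = m' + 1 := ⟨m - 1, by omega⟩
    have hb : ∀ n', pvBisectGo Q Y mode n' cur (cur + 1) = cur := by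
      intro n'
      cases n' with
      | zero => rfl
      | succ k => simp only [pvBisectGo]; rw [if_neg (by omega)]
    rw [pow_zero, hb]
    simp only [pvDescendGo]
    rw [if_pos trivial]
    omega
  | succ j ih =>
    intro n m cur hn hm
    obtain ⟨n', rfl⟩ : ∃ n', n = n' + 1 := ⟨n - 1, by omega⟩
    obtain ⟨m', rfl⟩ : ∃ m', m = m' + 1 := ⟨m - 1, by omega⟩
    have hp : (0 : Int) < 2 ^ j := by positivity
    have hs : (2 : Int) ^ (j + 1) = 2 ^ j + 2 ^ j := by rw [pow_succ]; ring
    simp only [pvBisectGo, pvDescendGo,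
      show cur + 2 ^ (j + 1) - cur = (2 : Int) ^ (j + 1) from by ring, fd_pow]
    rw [if_pos (by linarith : (1 : Int) < 2 ^ (j + 1)),
        if_neg (by intro hc; rw [hc] at hs; omega : ¬ (2 : Int) ^ (j + 1) = 1)]
    have hpt : cur + 2 ^ (j + 1) - 2 ^ j = cur + 2 ^ j := by linarith
    rw [hpt]
    by_cases hfail : pvFail Q Y mode (cur + 2 ^ j) = true
    · rw [if_neg (fun hc => by
          have := (fail_iff_not_ok Q Y mode (cur + 2 ^ j)).mp hc
          rw [hfail] at this; simp at this),
        if_pos hfail, ih n' m' cur (by omega) (by omega)]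
    · have hok := (fail_iff_not_ok Q Y mode (cur + 2 ^ j)).mpr (by
        cases hb : pvFail Q Y mode (cur + 2 ^ j) with
        | false => rfl
        | true => exact absurd hb hfail)
      rw [if_pos hok, if_neg hfail,
          show cur + 2 ^ (j + 1) = (cur + 2 ^ j) + 2 ^ j from by linarith,
          ih n' m' (cur + 2 ^ j) (by omega) (by omega)]

theorem bisect_eq_descend (Q : List Int) (Y : Int) (mode : Bool) (j : Nat) (cur : Int) :
    pvBisect Q Y mode cur (cur + 2 ^ j)
      = pvDescend Q Y mode (cur + 2 ^ j) (2 ^ j) := by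
  have hcast : (2 : Int) ^ j = ((2 ^ j : Nat) : Int) := by push_cast; ring
  have hjp : j < 2 ^ j := Nat.lt_two_pow_self
  unfold pvBisect pvDescend
  rw [show cur + 2 ^ j - cur = (2 : Int) ^ j from by ring]
  apply bisectGo_eq_descendGo
  · rw [hcast, Int.toNat_natCast]; omega
  · rw [hcast, Int.toNat_natCast]; omega

-- ===== VERDICT (by name: the statement is the Claim_ definition above) =====
theorem Integer_Inequality_spec : Claim_equal_Integer_Inequality := by
  intro P Y L mode default _ _
  unfold Spec_Integer_Inequality
  simp only [Integer_Inequality, Integer_Inequality_alt, take_lastNZ_eq_trimA]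
  by_cases hlen : 2 ≤ (pvTrimA P).length
  · rw [if_pos hlen, if_pos hlen]
    by_cases hg : pvFail (pvTrimA P) Y mode L = true
    · rw [if_pos ((fail_iff_guard (pvTrimA P) Y mode L).mpr hg), if_pos hg]
    · have hg' : pvFail (pvTrimA P) Y mode L = false := by
        cases hb : pvFail (pvTrimA P) Y mode L with
        | false => rfl
        | true => exact absurd hb hg
      rw [if_neg (fun hc => by
            have := (fail_iff_guard (pvTrimA P) Y mode L).mp hc
            rw [hg'] at this; simp at this),
          if_neg hg]
      have hd : (if mode then pvGrowLe (pvTrimA P) Y L 100 1 else pvGrowLt (pvTrimA P) Y L 100 1)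
          = pvFirstFail (pvTrimA P) Y mode L 100 1 := by
        cases mode
        · simp [growLt_eq]
        · simp [growLe_eq]
      rw [hd]
      obtain ⟨j, hj⟩ := firstFail_pow (pvTrimA P) Y mode L 100 0
      rw [pow_zero] at hj
      rw [hj, bisect_eq_descend]
  · rw [if_neg hlen, if_neg hlen]
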